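-- pv_equiv track=rewrite | github.com/HyeonBhinKim/codetree-TILs | 240806/함수를 이용한 합과 소수 판별/use-functions-to-determine-sums-and-decimals.py | issumeven
-- ===== SOURCE A (Python) =====
-- def issumeven(n):
--     sumten = 0
--     while n >= 10:
--         sumten += n%10
--         n = n//10
--     sumten += n
--
--     if sumten % 2:
--         return False
--     else:
--         return True
-- ===== SOURCE B (Python) =====
-- def issumeven(n):
--     if n < 10:
--         return n % 2 == 0
--     even = True
--     while n:
--         if n % 10 % 2:
--             even = not even
--         n //= 10
--     return even
-- ===== Notes on version B (the rewrite author's own statement) =====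
-- stated objective: alternative
-- what changed: Instead of accumulating the integer digit sum and testing its parity, B tracks only a boolean parity flag, flipping it once per odd digit while repeatedly dividing by ten, with an early parity return for single-digit (and negative) inputs.
import Mathlib
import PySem

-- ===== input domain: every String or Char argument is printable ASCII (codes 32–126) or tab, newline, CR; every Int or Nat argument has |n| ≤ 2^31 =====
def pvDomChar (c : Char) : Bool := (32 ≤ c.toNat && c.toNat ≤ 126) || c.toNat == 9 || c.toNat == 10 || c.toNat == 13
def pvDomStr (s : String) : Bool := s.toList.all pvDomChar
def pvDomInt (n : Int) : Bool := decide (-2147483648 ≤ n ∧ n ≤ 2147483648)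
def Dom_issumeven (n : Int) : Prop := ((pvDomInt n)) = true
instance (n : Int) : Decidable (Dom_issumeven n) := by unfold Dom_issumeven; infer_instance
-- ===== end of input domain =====

-- B keeps no digit sum at all: it tracks a boolean parity flag, flipped once per odd digit
-- while repeatedly dividing by ten, with an early parity return for single-digit and
-- negative inputs (alternative; same cost).
-- Both loop ports take a fuel argument (n.toNat, always sufficient) purely to make the
-- recursion structural; when fuel runs out they return the loop-exit value.

-- ===== PORT A =====
-- the while loop of A: state (n, sumten); on exit (and on exhausted fuel), sumten + n
def issumevenLoop (fuel : Nat) (n sumten : Int) : Int :=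
  match fuel with
  | 0 => sumten + n
  | fuel + 1 =>
    if n ≥ 10 then issumevenLoop fuel (PySem.Int.floordiv n 10) (sumten + PySem.Int.mod n 10)
    else sumten + n

def issumeven (n : Int) : Bool :=
  let sumten := issumevenLoop n.toNat n 0
  if PySem.Int.mod sumten 2 ≠ 0 then false else true

-- ===== PORT B =====
-- `while n:` — only ever entered with n ≥ 10, so n stays positive and the loop test is 0 < n;
-- on exit (and on exhausted fuel) the flag is returned
def parityLoop (fuel : Nat) (n : Int) (even : Bool) : Bool :=
  match fuel with
  | 0 => even
  | fuel + 1 =>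
    if 0 < n then
      parityLoop fuel (PySem.Int.floordiv n 10)
        (if PySem.Int.mod (PySem.Int.mod n 10) 2 ≠ 0 then !even else even)
    else even

def issumeven_alt (n : Int) : Bool :=
  if n < 10 then PySem.Int.mod n 2 == 0
  else parityLoop n.toNat n true

-- ===== PRECONDITION & SPEC =====
def Spec_issumeven (n : Int) (out : Bool) : Prop := out = issumeven_alt n
instance (n : Int) (out : Bool) : Decidable (Spec_issumeven n out) := by unfold Spec_issumeven; infer_instance

-- ===== CLAIM (what is proved, stated in full; the proofs are below) =====
def Claim_equal_issumeven : Prop := ∀ (n : Int), Dom_issumeven n → Spec_issumeven n (issumeven n)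

-- ===== LEMMAS AND PROOFS =====

-- proof-only helper: the digit sum A's loop computes (never used by the ports)
def digsumP (n : Int) : Int :=
  if h : n ≥ 10 then PySem.Int.mod n 10 + digsumP (PySem.Int.floordiv n 10) else n
termination_by n.toNat
decreasing_by
  have h2 : PySem.Int.floordiv n 10 = n / 10 := PySem.Int.floordiv_eq_ediv_of_pos (by omega)
  rw [h2]; omega

theorem fuel_still_enough (fuel : Nat) (n : Int) (h : 0 < n) (hf : n.toNat ≤ fuel + 1) :
    (PySem.Int.floordiv n 10).toNat ≤ fuel := by
  rw [PySem.Int.floordiv_eq_ediv_of_pos (by omega)]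
  omega

theorem issumevenLoop_eq_digsumP (fuel : Nat) (n sumten : Int) (hf : n.toNat ≤ fuel) :
    issumevenLoop fuel n sumten = sumten + digsumP n := by
  induction fuel generalizing n sumten with
  | zero =>
    have h10 : ¬ n ≥ 10 := by omega
    rw [issumevenLoop, digsumP]
    simp only [h10, dite_false]
  | succ fuel ih =>
    rw [issumevenLoop, digsumP]
    by_cases h10 : n ≥ 10
    · simp only [h10, if_pos, dite_true]
      rw [ih _ _ (fuel_still_enough fuel n (by omega) hf)]
      ring
    · simp only [h10, if_neg, dite_false, not_false_iff]

theorem digsumP_step (n : Int) (h : 0 < n) :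
    digsumP n = PySem.Int.mod n 10 + digsumP (PySem.Int.floordiv n 10) := by
  by_cases h10 : n ≥ 10
  · rw [digsumP]; simp only [h10, dite_true]
  · have hfd : PySem.Int.floordiv n 10 = 0 := by
      rw [PySem.Int.floordiv_eq_ediv_of_pos (by omega)]; omega
    have hm : PySem.Int.mod n 10 = n := by
      rw [PySem.Int.mod_eq_emod_of_pos (by omega)]; omega
    rw [digsumP, hfd, digsumP]
    simp only [h10, dite_false, show ¬((0:Int) ≥ 10) by omega, hm]
    ring

-- parity-flag ite algebra for one loop step
theorem flip_step (a d : Int) (e : Bool) :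
    (if d % 2 = 0 then (if a % 2 ≠ 0 then !e else e) else !(if a % 2 ≠ 0 then !e else e))
      = if (a + d) % 2 = 0 then e else !e := by
  rcases Int.emod_two_eq a with ha | ha <;> rcases Int.emod_two_eq d with hd | hd <;>
    rcases Int.emod_two_eq (a + d) with hs | hs <;>
    simp [ha, hd, hs] <;> exfalso <;> omega

-- B's parity flag computes the parity of the digit sum, for nonnegative n
theorem parityLoop_eq (fuel : Nat) (n : Int) (even : Bool) (hn : 0 ≤ n) (hf : n.toNat ≤ fuel) :
    parityLoop fuel n even = (if PySem.Int.mod (digsumP n) 2 = 0 then even else !even) := by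
  induction fuel generalizing n even with
  | zero =>
    have hn0 : n = 0 := by omega
    subst hn0
    rw [parityLoop]
    have h0 : digsumP 0 = 0 := by rw [digsumP]; simp
    simp [h0]
  | succ fuel ih =>
    rw [parityLoop]
    by_cases h : 0 < n
    · simp only [h, if_pos]
      have hd : 0 ≤ PySem.Int.floordiv n 10 := by
        rw [PySem.Int.floordiv_eq_ediv_of_pos (by omega)]; omega
      rw [ih _ _ hd (fuel_still_enough fuel n h hf), digsumP_step n h]
      simp only [PySem.Int.mod_eq_emod_of_pos (show (0:Int) < 2 by omega)]
      exact flip_step (PySem.Int.mod n 10) (digsumP (PySem.Int.floordiv n 10)) even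
    · have hn0 : n = 0 := by omega
      subst hn0
      simp only [lt_irrefl, if_neg, not_false_iff]
      have h0 : digsumP 0 = 0 := by rw [digsumP]; simp
      simp [h0]

-- ===== VERDICT (by name: the statement is the Claim_ definition above) =====
theorem issumeven_spec : Claim_equal_issumeven := by
  intro n _
  unfold Spec_issumeven issumeven issumeven_alt
  rw [issumevenLoop_eq_digsumP n.toNat n 0 le_rfl, zero_add]
  by_cases hlt : n < 10
  · have hA : digsumP n = n := by rw [digsumP]; simp [show ¬(n ≥ 10) by omega]
    rw [hA]
    simp only [hlt, if_pos, PySem.Int.mod_eq_emod_of_pos (show (0:Int) < 2 by omega)]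
    rcases Int.emod_two_eq n with h | h <;> simp [h]
  · have hn : 0 ≤ n := by omega
    rw [parityLoop_eq n.toNat n true hn le_rfl]
    simp only [hlt, if_neg, not_false_iff]
    rcases Int.emod_two_eq (digsumP n) with h2 | h2 <;> simp [h2]
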